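-- pv_equiv track=rewrite | github.com/pypi-data/pypi-mirror-400 | packages/CTViewer-Research/ctviewer_research-0.3.3.2.2.tar.gz/ctviewer_research-0.3.3.2.2/src/ct_viewer/ct_processes/FileDialog.py | multisort
-- ===== SOURCE A (Python) =====
-- def multisort(x_list, sort_specs, make_copy = True, return_sorted_list = False):
--     if make_copy:
--         return_list = [val for val in x_list]
--     else:
--         return_list = x_list
--
--     # Reverse sort specs so we work our way out of the sorting appropriately,
--     # where we sort the last key first.
--
--     for index, reverse in reversed(sort_specs):
--         return_list.sort(key = itemgetter(index), reverse = reverse <= 0)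
--
--     new_indices = []
--
--     for new_index, row_tuple in enumerate(return_list):
--         new_indices.append(row_tuple[-2]) # internal dpg item number, row id
--
--     if return_sorted_list:
--         return return_list, new_indices
--     else:
--         return new_indices
-- ===== SOURCE B (Python) =====
-- def multisort(x_list, sort_specs, make_copy = True, return_sorted_list = False):
--     # Single comparator-driven stable sort instead of one stable pass per spec.
--     # Mutates x_list in place (like A) when make_copy is False.
--     return_list = list(x_list) if make_copy else x_list
--
--     def cmp_rows(row_a, row_b):
--         for index, reverse in sort_specs:
--             va, vb = row_a[index], row_b[index]
--             if va == vb: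
--                 continue
--             less = -1 if va < vb else 1
--             return -less if reverse <= 0 else less
--         return 0
--
--     class _Key:
--         def __init__(self, row):
--             self.row = row
--         def __lt__(self, other):
--             return cmp_rows(self.row, other.row) < 0
--
--     return_list.sort(key=_Key)
--
--     new_indices = [row[-2] for row in return_list]
--
--     if return_sorted_list:
--         return return_list, new_indices
--     return new_indices
-- ===== Notes on version B (the rewrite author's own statement) =====
-- stated objective: alternative
-- what changed: A runs one stable sort pass per sort spec (in reverse spec order); B performs a single stable sort with a lexicographic comparator that walks sort_specs forward, flipping the -1/1 result when reverse <= 0 and falling through to the next spec on equal cells.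
-- outside the precondition, e.g. on multisort([(1, 2)], [], True, True): A returns [[[1, 2]], [1]], B returns [[[1, 2]], [1]]
import Mathlib
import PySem

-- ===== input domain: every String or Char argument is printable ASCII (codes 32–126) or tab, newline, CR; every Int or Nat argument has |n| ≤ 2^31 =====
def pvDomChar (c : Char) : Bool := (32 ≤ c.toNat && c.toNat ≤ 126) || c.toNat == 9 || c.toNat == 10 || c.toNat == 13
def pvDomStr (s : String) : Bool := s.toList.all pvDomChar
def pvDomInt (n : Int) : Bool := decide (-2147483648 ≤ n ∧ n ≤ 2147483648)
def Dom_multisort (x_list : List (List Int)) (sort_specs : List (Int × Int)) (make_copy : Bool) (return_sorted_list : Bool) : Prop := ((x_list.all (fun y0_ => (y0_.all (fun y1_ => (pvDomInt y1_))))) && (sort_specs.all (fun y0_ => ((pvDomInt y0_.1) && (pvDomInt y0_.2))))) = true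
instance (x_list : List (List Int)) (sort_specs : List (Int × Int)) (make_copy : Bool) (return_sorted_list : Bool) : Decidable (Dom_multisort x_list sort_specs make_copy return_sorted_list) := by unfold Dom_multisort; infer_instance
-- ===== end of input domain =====

-- B replaces A's per-spec sequence of stable sort passes by ONE stable sort driven by a
-- lexicographic comparator over sort_specs (alternative algorithm, same asymptotic cost).
-- When make_copy=False both Pythons sort x_list in place; the equivalence proved here is
-- about the RETURN value (B performs the same mutation).


-- ===== PORT A =====
def multisort (x_list : List (List Int)) (sort_specs : List (Int × Int)) (make_copy : Bool) (return_sorted_list : Bool) : List Int :=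
  -- return_list = [val for val in x_list]  /  return_list = x_list
  let return_list := if make_copy then x_list.map (fun val => val) else x_list
  -- for index, reverse in reversed(sort_specs): return_list.sort(key=itemgetter(index), reverse=reverse<=0)
  let return_list := (sort_specs.reverse).foldl
    (fun acc spec =>
      PySem.List.sorted acc (fun row => PySem.List.pyGetD row spec.1 0) (decide (spec.2 ≤ 0)))
    return_list
  -- new_indices = []; for ...: new_indices.append(row_tuple[-2])
  let new_indices := return_list.foldl (fun acc row => acc ++ [PySem.List.pyGetD row (-2) 0]) []
  -- 'if return_sorted_list: return return_list, new_indices' returns a (list, list) TUPLE,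
  -- not a value of the declared List Int return type; Pre_multisort excludes that flag value
  -- (B returns the identical tuple there in Python), so the port returns new_indices.
  new_indices

-- ===== PORT B =====
-- cmp_rows(row_a, row_b): walk sort_specs forward, -1/1 on the first differing cell (flipped
-- when reverse <= 0), 0 on a full tie
def cmpRows (sort_specs : List (Int × Int)) (row_a row_b : List Int) : Int :=
  match sort_specs with
  | [] => 0
  | (index, reverse) :: rest =>
    let va := PySem.List.pyGetD row_a index 0
    let vb := PySem.List.pyGetD row_b index 0
    if va = vb then cmpRows rest row_a row_b
    else
      let less : Int := if va < vb then -1 else 1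
      if reverse ≤ 0 then -less else less

def multisort_alt (x_list : List (List Int)) (sort_specs : List (Int × Int)) (make_copy : Bool) (return_sorted_list : Bool) : List Int :=
  -- return_list = list(x_list) if make_copy else x_list (the copy has the same value)
  let return_list := x_list
  -- return_list.sort(key=_Key), _Key.__lt__ a b = cmp_rows a b < 0: Python's stable sort under
  -- that strict order, modeled (as PySem models every key sort) by stable insertion via insertBy
  let sorted_list := return_list.foldl
    (fun acc row => PySem.List.insertBy (fun a b => decide (cmpRows sort_specs a b < 0)) row acc) []
  -- new_indices = [row[-2] for row in return_list]
  let new_indices := sorted_list.map (fun row => PySem.List.pyGetD row (-2) 0)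
  -- return_sorted_list = true (tuple return) is outside Pre_multisort
  new_indices

-- ===== PRECONDITION & SPEC =====
-- Pre_ excludes exactly the inputs where A does not return a value of the declared List Int
-- type: a row shorter than 2 (row_tuple[-2] raises IndexError), a spec index out of range for
-- some row (itemgetter raises IndexError during a sort pass), and return_sorted_list=True,
-- where A returns a (sorted_list, new_indices) TUPLE — not a List Int, so nothing about it can
-- be stated under this signature; the Python B returns the IDENTICAL tuple there (see the
-- cited example), so no behavioural difference is hidden by this exclusion.
def Pre_multisort (x_list : List (List Int)) (sort_specs : List (Int × Int)) (make_copy : Bool) (return_sorted_list : Bool) : Prop :=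
  return_sorted_list = false ∧
  (∀ row ∈ x_list, 2 ≤ row.length) ∧
  (∀ spec ∈ sort_specs, ∀ row ∈ x_list, -(row.length : Int) ≤ spec.1 ∧ spec.1 < (row.length : Int))
instance (x_list : List (List Int)) (sort_specs : List (Int × Int)) (make_copy : Bool) (return_sorted_list : Bool) : Decidable (Pre_multisort x_list sort_specs make_copy return_sorted_list) := by unfold Pre_multisort; infer_instance

def pvWitness_multisort : List (List Int) × (List (Int × Int)) × Bool × Bool :=
  ([[3, 7], [1, 4], [3, 5]], [(0, 1), (1, -1)], true, false)

def Spec_multisort (x_list : List (List Int)) (sort_specs : List (Int × Int)) (make_copy : Bool) (return_sorted_list : Bool) (out : List Int) : Prop := out = multisort_alt x_list sort_specs make_copy return_sorted_list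
instance (x_list : List (List Int)) (sort_specs : List (Int × Int)) (make_copy : Bool) (return_sorted_list : Bool) (out : List Int) : Decidable (Spec_multisort x_list sort_specs make_copy return_sorted_list out) := by unfold Spec_multisort; infer_instance

-- ===== CLAIM (what is proved, stated in full; the proofs are below) =====
def Claim_equal_multisort : Prop := ∀ (x_list : List (List Int)) (sort_specs : List (Int × Int)) (make_copy : Bool) (return_sorted_list : Bool), Dom_multisort x_list sort_specs make_copy return_sorted_list → Pre_multisort x_list sort_specs make_copy return_sorted_list → Spec_multisort x_list sort_specs make_copy return_sorted_list (multisort x_list sort_specs make_copy return_sorted_list)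

-- ===== LEMMAS AND PROOFS =====

-- Stable insertion sort with a boolean strict order, with explicit accumulator
def pvF {α : Type} (p : α → α → Bool) (A : List α) (M : List α) : List α :=
  M.foldl (fun acc x => PySem.List.insertBy p x acc) A

def pvSort {α : Type} (p : α → α → Bool) (xs : List α) : List α := pvF p [] xs

-- lexicographic combination of two boolean strict orders (p primary)
def pvLex {α : Type} (p q : α → α → Bool) : α → α → Bool :=
  fun a b => p a b || (!p a b && !p b a && q a b)

def pvAsym {α : Type} (p : α → α → Bool) : Prop := ∀ a b, p a b = true → p b a = false
def pvSwo {α : Type} (p : α → α → Bool) : Prop := ∀ a b c, p a c = true → p a b = true ∨ p b c = true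

-- the strict order of one of A's sort passes
def pvKeyP (spec : Int × Int) : List Int → List Int → Bool :=
  fun a b =>
    if spec.2 ≤ 0 then decide (PySem.List.pyGetD b spec.1 0 < PySem.List.pyGetD a spec.1 0)
    else decide (PySem.List.pyGetD a spec.1 0 < PySem.List.pyGetD b spec.1 0)

-- the lexicographic order of all specs
def pvLexAll (specs : List (Int × Int)) : List Int → List Int → Bool :=
  specs.foldr (fun s acc => pvLex (pvKeyP s) acc) (fun _ _ => false)

theorem pvLex_not_q {α : Type} (p q : α → α → Bool) (a b : α) (h : q a b = false) :
    pvLex p q a b = p a b := by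
  simp [pvLex, h]

theorem pvIns_congr {α : Type} (p p' : α → α → Bool) (x : α) (l : List α)
    (h : ∀ a ∈ l, p x a = p' x a) : PySem.List.insertBy p x l = PySem.List.insertBy p' x l := by
  induction l with
  | nil => simp [PySem.List.insertBy]
  | cons a l ih =>
    have ha := h a (by simp)
    simp only [PySem.List.insertBy, ← ha]
    by_cases hpa : p x a = true
    · simp [hpa]
    · simp only [Bool.not_eq_true] at hpa
      simp [hpa, ih (fun b hb => h b (by simp [hb]))]

theorem pvIns_lex_of_not_q {α : Type} (p q : α → α → Bool) (x : α) (A : List α)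
    (h : ∀ a ∈ A, q x a = false) :
    PySem.List.insertBy p x A = PySem.List.insertBy (pvLex p q) x A :=
  pvIns_congr _ _ _ _ (fun a ha => (pvLex_not_q p q x a (h a ha)).symm)

-- the commuting step: inserting y (by p) past an x already placed by the lexicographic order
theorem pvComm {α : Type} (p q : α → α → Bool) (hA : pvAsym p) (hS : pvSwo p)
    (x y : α) (hq : q x y = true) (A : List α) :
    PySem.List.insertBy p y (PySem.List.insertBy (pvLex p q) x A)
      = PySem.List.insertBy (pvLex p q) x (PySem.List.insertBy p y A) := by
  induction A with
  | nil =>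
    by_cases hyx : p y x = true
    · have hxy := hA _ _ hyx
      simp [PySem.List.insertBy, pvLex, hyx, hxy, hq]
    · simp only [Bool.not_eq_true] at hyx
      simp [PySem.List.insertBy, pvLex, hyx, hq]
  | cons a A ih =>
    by_cases hlxa : pvLex p q x a = true
    · -- x goes before a
      by_cases hya : p y a = true
      · by_cases hyx : p y x = true
        · have hlxy : pvLex p q x y = false := by
            have := hA _ _ hyx; simp [pvLex, hyx, this]
          simp [PySem.List.insertBy, hlxa, hya, hyx, hlxy]
        · simp only [Bool.not_eq_true] at hyx
          have hlxy : pvLex p q x y = true := by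
            by_cases hxy : p x y = true
            · simp [pvLex, hxy]
            · simp only [Bool.not_eq_true] at hxy
              simp [pvLex, hxy, hyx, hq]
          simp [PySem.List.insertBy, hlxa, hya, hyx, hlxy]
      · simp only [Bool.not_eq_true] at hya
        have hyx : p y x = false := by
          by_cases h' : p y x = true
          · exfalso
            have hax : p a x = true := by
              rcases (hS y a x h') with h1 | h2
              · rw [hya] at h1; exact absurd h1 (by simp)
              · exact h2
            by_cases hxa' : p x a = true
            · exact absurd (hA _ _ hxa') (by simp [hax])
            · simp only [Bool.not_eq_true] at hxa'
              simp [pvLex, hxa', hax] at hlxa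
          · simpa using h'
        simp [PySem.List.insertBy, hlxa, hya, hyx]
    · simp only [Bool.not_eq_true] at hlxa
      by_cases hya : p y a = true
      · have hxa : p x a = false := by
          by_cases h' : p x a = true
          · simp [pvLex, h'] at hlxa
          · simpa using h'
        have hyx : p y x = true := by
          rcases (hS y x a hya) with h1 | h2
          · exact h1
          · rw [hxa] at h2; exact absurd h2 (by simp)
        have hlxy : pvLex p q x y = false := by
          have := hA _ _ hyx; simp [pvLex, hyx, this]
        simp [PySem.List.insertBy, hlxa, hya, hlxy]
      · simp only [Bool.not_eq_true] at hya
        simp [PySem.List.insertBy, hlxa, hya, ih]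

-- pushing an x placed by the lexicographic order through a fold of p-insertions
theorem pvKeyStep {α : Type} (p q : α → α → Bool) (hA : pvAsym p) (hS : pvSwo p)
    (x : α) (M : List α) (hM : ∀ y ∈ M, q x y = true) :
    ∀ A : List α,
      pvF p (PySem.List.insertBy (pvLex p q) x A) M
        = PySem.List.insertBy (pvLex p q) x (pvF p A M) := by
  induction M with
  | nil => intro A; simp [pvF]
  | cons y M ih =>
    intro A
    have hy : q x y = true := hM y (by simp)
    simp only [pvF, List.foldl_cons]
    rw [pvComm p q hA hS x y hy A]
    exact ih (fun z hz => hM z (by simp [hz])) _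

-- insertion by q preserves q-sortedness (no inversions)
theorem pvIns_pairwise {α : Type} (q : α → α → Bool) (hA : pvAsym q) (hS : pvSwo q)
    (x : α) (l : List α) (h : l.Pairwise (fun a b => q b a = false)) :
    (PySem.List.insertBy q x l).Pairwise (fun a b => q b a = false) := by
  induction l with
  | nil => simp [PySem.List.insertBy]
  | cons a l ih =>
    rw [List.pairwise_cons] at h
    obtain ⟨ha, hl⟩ := h
    by_cases hxa : q x a = true
    · have hax : q a x = false := hA _ _ hxa
      simp only [PySem.List.insertBy, hxa]
      refine List.pairwise_cons.mpr ⟨?_, List.pairwise_cons.mpr ⟨ha, hl⟩⟩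
      intro b hb
      rcases List.mem_cons.mp hb with rfl | hb
      · exact hax
      · -- b ∈ l; suppose q b x: swo gives q b a ∨ q a x, both false
        by_cases hbx : q b x = true
        · rcases hS b a x hbx with h1 | h2
          · rw [ha b hb] at h1; exact absurd h1 (by simp)
          · exact absurd h2 (by simp [hA _ _ hxa])
        · simpa using hbx
    · simp only [Bool.not_eq_true] at hxa
      simp only [PySem.List.insertBy, hxa]
      rw [if_neg (by simp)]
      refine List.pairwise_cons.mpr ⟨?_, ih hl⟩
      intro b hb
      rcases (PySem.List.mem_insertBy q x b l).mp hb with rfl | hb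
      · exact hxa
      · exact ha b hb

theorem pvF_pairwise {α : Type} (q : α → α → Bool) (hA : pvAsym q) (hS : pvSwo q)
    (xs : List α) : ∀ A : List α, A.Pairwise (fun a b => q b a = false) →
      (pvF q A xs).Pairwise (fun a b => q b a = false) := by
  induction xs with
  | nil => intro A h; simpa [pvF] using h
  | cons x xs ih =>
    intro A h
    simp only [pvF, List.foldl_cons]
    exact ih _ (pvIns_pairwise q hA hS x A h)

-- the key lemma: a p-insertion-sort applied after inserting x by q into a q-sorted L is the
-- lexicographic insertion of x into the p-sort of L
theorem pvKey {α : Type} (p q : α → α → Bool)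
    (hAp : pvAsym p) (hSp : pvSwo p) (hSq : pvSwo q)
    (x : α) (L : List α) (hL : L.Pairwise (fun a b => q b a = false)) :
    ∀ A : List α, (∀ a ∈ A, q x a = false) →
      pvF p A (PySem.List.insertBy q x L) = PySem.List.insertBy (pvLex p q) x (pvF p A L) := by
  induction L with
  | nil =>
    intro A hA
    simp only [PySem.List.insertBy, pvF, List.foldl_cons, List.foldl_nil]
    exact pvIns_lex_of_not_q p q x A hA
  | cons a L ihL =>
    intro A hA
    rw [List.pairwise_cons] at hL
    obtain ⟨ha, hL'⟩ := hL
    by_cases hxa : q x a = true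
    · have hall : ∀ y ∈ a :: L, q x y = true := by
        intro y hy
        rcases List.mem_cons.mp hy with rfl | hy
        · exact hxa
        · rcases hSq x y a hxa with h1 | h2
          · exact h1
          · rw [ha y hy] at h2; exact absurd h2 (by simp)
      simp only [PySem.List.insertBy, hxa]
      show pvF p A (x :: a :: L) = _
      have : pvF p A (x :: a :: L) = pvF p (PySem.List.insertBy p x A) (a :: L) := by
        simp [pvF]
      rw [this, pvIns_lex_of_not_q p q x A hA,
          pvKeyStep p q hAp hSp x (a :: L) hall A]
    · simp only [Bool.not_eq_true] at hxa
      simp only [PySem.List.insertBy, hxa]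
      rw [if_neg (by simp)]
      show pvF p A (a :: PySem.List.insertBy q x L) = _
      have h1 : pvF p A (a :: PySem.List.insertBy q x L)
          = pvF p (PySem.List.insertBy p a A) (PySem.List.insertBy q x L) := by simp [pvF]
      have h2 : ∀ b ∈ PySem.List.insertBy p a A, q x b = false := by
        intro b hb
        rcases (PySem.List.mem_insertBy p a b A).mp hb with rfl | hb
        · exact hxa
        · exact hA b hb
      rw [h1, ihL hL' _ h2]
      have : pvF p A (a :: L) = pvF p (PySem.List.insertBy p a A) L := by simp [pvF]
      rw [this]

theorem pvSort_append {α : Type} (p : α → α → Bool) (xs : List α) (x : α) :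
    pvSort p (xs ++ [x]) = PySem.List.insertBy p x (pvSort p xs) := by
  simp [pvSort, pvF]

-- MAIN: stable sort by q then stable sort by p = stable sort by the lexicographic order
theorem pvMain {α : Type} (p q : α → α → Bool)
    (hAp : pvAsym p) (hSp : pvSwo p) (hAq : pvAsym q) (hSq : pvSwo q) (xs : List α) :
    pvSort p (pvSort q xs) = pvSort (pvLex p q) xs := by
  induction xs using List.reverseRecOn with
  | nil => rfl
  | append_singleton xs x ih =>
    rw [pvSort_append, pvSort_append]
    have hsorted : (pvSort q xs).Pairwise (fun a b => q b a = false) :=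
      pvF_pairwise q hAq hSq xs [] (by simp)
    rw [← ih]
    simpa [pvSort] using pvKey p q hAp hSp hSq x (pvSort q xs) hsorted [] (by simp)

-- the per-pass order is a strict weak order
theorem pvKeyP_asym (s : Int × Int) : pvAsym (pvKeyP s) := by
  intro a b h
  simp only [pvKeyP] at *
  split_ifs at * <;> simp_all <;> omega

theorem pvKeyP_swo (s : Int × Int) : pvSwo (pvKeyP s) := by
  intro a b c h
  simp only [pvKeyP] at *
  split_ifs at * <;> simp_all <;> omega

-- lexicographic combination preserves strict-weak-orderness
theorem pvLex_asym {α : Type} (p q : α → α → Bool) (hAp : pvAsym p) (hAq : pvAsym q) :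
    pvAsym (pvLex p q) := by
  intro a b h
  by_cases hp : p a b = true
  · simp [pvLex, hp, hAp _ _ hp]
  · simp only [Bool.not_eq_true] at hp
    simp only [pvLex, Bool.or_eq_true, Bool.and_eq_true, Bool.not_eq_true'] at h
    rcases h with h | ⟨⟨-, h2⟩, h3⟩
    · rw [hp] at h; exact Bool.noConfusion h
    · simp [pvLex, h2, hAq _ _ h3]

theorem pvLex_swo {α : Type} (p q : α → α → Bool)
    (hSp : pvSwo p) (hSq : pvSwo q) : pvSwo (pvLex p q) := by
  intro a b c h
  simp only [pvLex, Bool.or_eq_true, Bool.and_eq_true, Bool.not_eq_true'] at h ⊢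
  rcases h with h | ⟨⟨h1, h2⟩, h3⟩
  · rcases hSp a b c h with h' | h'
    · exact Or.inl (Or.inl h')
    · exact Or.inr (Or.inl h')
  · by_cases hab : p a b = true
    · exact Or.inl (Or.inl hab)
    · by_cases hba : p b a = true
      · rcases hSp b c a hba with h' | h'
        · exact Or.inr (Or.inl h')
        · rw [h2] at h'; exact absurd h' (by simp)
      · simp only [Bool.not_eq_true] at hab hba
        have hbc : p b c = false := by
          by_cases h' : p b c = true
          · rcases hSp b a c h' with h'' | h''
            · rw [hba] at h''; exact absurd h'' (by simp)
            · rw [h1] at h''; exact absurd h'' (by simp)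
          · simpa using h'
        have hcb : p c b = false := by
          by_cases h' : p c b = true
          · rcases hSp c a b h' with h'' | h''
            · rw [h2] at h''; exact absurd h'' (by simp)
            · rw [hab] at h''; exact absurd h'' (by simp)
          · simpa using h'
        rcases hSq a b c h3 with h' | h'
        · exact Or.inl (Or.inr ⟨⟨hab, hba⟩, h'⟩)
        · exact Or.inr (Or.inr ⟨⟨hbc, hcb⟩, h'⟩)

theorem pvLexAll_asym (specs : List (Int × Int)) : pvAsym (pvLexAll specs) := by
  induction specs with
  | nil => intro a b h; exact absurd h (by simp [pvLexAll])
  | cons s rest ih => exact pvLex_asym _ _ (pvKeyP_asym s) ih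

theorem pvLexAll_swo (specs : List (Int × Int)) : pvSwo (pvLexAll specs) := by
  induction specs with
  | nil => intro a b c h; exact absurd h (by simp [pvLexAll])
  | cons s rest ih => exact pvLex_swo _ _ (pvKeyP_swo s) ih

-- B's comparator computes exactly the lexicographic order of all specs
theorem pvCmp_eq_lexAll (specs : List (Int × Int)) (a b : List Int) :
    decide (cmpRows specs a b < 0) = pvLexAll specs a b := by
  induction specs with
  | nil => simp [cmpRows, pvLexAll]
  | cons s rest ih =>
    obtain ⟨i, rev⟩ := s
    simp only [cmpRows, pvLexAll, List.foldr_cons, pvLex, pvKeyP]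
    by_cases heq : PySem.List.pyGetD a i 0 = PySem.List.pyGetD b i 0
    · simp only [if_pos heq]
      rw [ih]
      simp [heq]
      rfl
    · simp only [if_neg heq]
      by_cases hlt : PySem.List.pyGetD a i 0 < PySem.List.pyGetD b i 0 <;>
        by_cases hrev : rev ≤ 0 <;>
          simp [hlt, hrev] <;> omega

-- sorting with the everywhere-false order is the identity
theorem pvF_false {α : Type} (xs : List α) : ∀ A : List α,
    pvF (fun _ _ => (false : Bool)) A xs = A ++ xs := by
  induction xs with
  | nil => intro A; simp [pvF]
  | cons x xs ih =>
    intro A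
    simp only [pvF, List.foldl_cons]
    rw [show PySem.List.insertBy (fun _ _ => (false : Bool)) x A = A ++ [x] from
      PySem.List.insertBy_of_forall_not_before _ x A (by simp)]
    simpa [pvF] using ih (A ++ [x])

-- one of A's passes is an insertion sort by pvKeyP
theorem pvPass_eq (s : Int × Int) (ys : List (List Int)) :
    PySem.List.sorted ys (fun row => PySem.List.pyGetD row s.1 0) (decide (s.2 ≤ 0))
      = pvSort (pvKeyP s) ys := by
  by_cases h : s.2 ≤ 0
  · rw [show (decide (s.2 ≤ 0)) = true by simp [h],
      PySem.List.sorted_rev_eq_foldl_insertBy,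
      show pvKeyP s = fun a b => decide (PySem.List.pyGetD b s.1 0 < PySem.List.pyGetD a s.1 0) by
        funext a b; simp [pvKeyP, h]]
    rfl
  · rw [show (decide (s.2 ≤ 0)) = false by simp [h],
      PySem.List.sorted_eq_foldl_insertBy,
      show pvKeyP s = fun a b => decide (PySem.List.pyGetD a s.1 0 < PySem.List.pyGetD b s.1 0) by
        funext a b; simp [pvKeyP, h]]
    rfl

-- A's chain of passes = one sort by the lexicographic order of all specs
theorem pvChain_eq (specs : List (Int × Int)) (xs : List (List Int)) :
    (specs.reverse).foldl
        (fun acc spec =>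
          PySem.List.sorted acc (fun row => PySem.List.pyGetD row spec.1 0) (decide (spec.2 ≤ 0)))
        xs
      = pvSort (pvLexAll specs) xs := by
  rw [List.foldl_reverse]
  induction specs with
  | nil => simp [pvLexAll, pvSort, pvF_false]
  | cons s rest ih =>
    simp only [List.foldr_cons]
    rw [ih, pvPass_eq]
    rw [pvMain (pvKeyP s) (pvLexAll rest) (pvKeyP_asym s) (pvKeyP_swo s)
      (pvLexAll_asym rest) (pvLexAll_swo rest)]
    rfl

-- ===== VERDICT (by name: the statement is the Claim_ definition above) =====
theorem multisort_spec : Claim_equal_multisort := by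
  intro x_list sort_specs make_copy return_sorted_list _hdom _hpre
  simp only [Spec_multisort, multisort, multisort_alt]
  have hcopy : (if make_copy then x_list.map (fun val => val) else x_list) = x_list := by
    cases make_copy <;> simp
  rw [hcopy, pvChain_eq]
  have hpred : (fun a b => decide (cmpRows sort_specs a b < 0)) = pvLexAll sort_specs := by
    funext a b; exact pvCmp_eq_lexAll sort_specs a b
  rw [show (x_list.foldl
      (fun acc row => PySem.List.insertBy (fun a b => decide (cmpRows sort_specs a b < 0)) row acc) [])
      = pvSort (pvLexAll sort_specs) x_list by simp [pvSort, pvF, hpred]]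
  rw [PySem.List.foldl_append_singleton_eq_map, List.nil_append]
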